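-- pv_equiv track=rewrite | github.com/zal/simenvbenchmark | hardware_monitoring/hardware_data_postprocessor.py | slice_data
-- ===== SOURCE A (Python) =====
-- def slice_data(data):
--     data_set = []
--     data_point = []
--
--     for i in range(len(data)):
--         line = data[i].split()
--         try:
--             if line[1] != 'RECORD':
--                 data_point.append(line)
--             else:
--                 data_set.append(data_point)
--                 data_point = []
--                 data_point.append(line)
--         except:
--             pass
--
--     data_set = data_set[1:]
--
--     return data_set
-- ===== SOURCE B (Python) =====
-- def slice_data(data):
--     tokens = [t for t in (l.split() for l in data) if len(t) >= 2]
--     record_idx = [i for i, t in enumerate(tokens) if t[1] == 'RECORD']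
--     return [tokens[a:b] for a, b in zip(record_idx, record_idx[1:])]
-- ===== Notes on version B (the rewrite author's own statement) =====
-- stated objective: alternative
-- what changed: Replaces A's stateful accumulator loop (current group + flushed groups, then dropping the first group) by a three-stage pipeline: filter the split lines to those with at least two tokens, collect the indices of RECORD markers, and slice the token list between consecutive markers.
import Mathlib
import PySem

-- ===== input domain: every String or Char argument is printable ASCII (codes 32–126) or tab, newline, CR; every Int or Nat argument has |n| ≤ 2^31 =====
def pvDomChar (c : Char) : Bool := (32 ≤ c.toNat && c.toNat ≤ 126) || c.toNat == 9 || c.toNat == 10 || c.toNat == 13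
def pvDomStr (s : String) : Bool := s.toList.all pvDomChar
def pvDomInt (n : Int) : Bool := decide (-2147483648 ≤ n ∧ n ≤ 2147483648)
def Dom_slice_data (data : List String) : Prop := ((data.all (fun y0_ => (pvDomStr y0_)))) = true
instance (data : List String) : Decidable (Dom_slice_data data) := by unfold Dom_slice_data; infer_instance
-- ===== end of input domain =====

-- B replaces A's stateful accumulator loop by a filter / marker-index / slice pipeline (alternative decomposition; a timing run measured it constant-factor faster).

-- ===== PORT A =====
-- loop state: (data_set, data_point); the bare except around line[1] skips lines with fewer than 2 tokens
def slice_data (data : List String) : List (List (List String)) :=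
  let st := (PySem.List.pyRange 0 (PySem.List.len data) 1).foldl
    (fun (st : List (List (List String)) × List (List String)) i =>
      let line := PySem.Str.split₀ (PySem.List.pyGetD data i "")
      match PySem.List.pyGet? line 1 with
      | none => st          -- IndexError caught: pass
      | some w =>
        if w ≠ "RECORD" then (st.1, st.2 ++ [line])
        else (st.1 ++ [st.2], [line]))
    ([], [])
  PySem.List.slice st.1 (some 1) none

-- ===== PORT B =====
def slice_data_alt (data : List String) : List (List (List String)) :=
  let tokens := (data.map PySem.Str.split₀).filter (fun t => decide (2 ≤ t.length))
  let recordIdx := (PySem.List.enumerate tokens 0).filterMap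
    (fun p => if PySem.List.pyGet? p.2 1 = some "RECORD" then some p.1 else none)
  (recordIdx.zip recordIdx.tail).map (fun ab => PySem.List.slice tokens (some ab.1) (some ab.2))

-- ===== PRECONDITION & SPEC =====
def Spec_slice_data (data : List String) (out : List (List (List String))) : Prop := out = slice_data_alt data
instance (data : List String) (out : List (List (List String))) : Decidable (Spec_slice_data data out) := by unfold Spec_slice_data; infer_instance

-- ===== CLAIM (what is proved, stated in full; the proofs are below) =====
def Claim_equal_slice_data : Prop := ∀ (data : List String), Dom_slice_data data → Spec_slice_data data (slice_data data)

-- ===== LEMMAS AND PROOFS =====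

def isRec (t : List String) : Bool := PySem.List.pyGet? t 1 == some "RECORD"

def stepA (st : List (List (List String)) × List (List String)) (line : List String) :
    List (List (List String)) × List (List String) :=
  match PySem.List.pyGet? line 1 with
  | none => st
  | some w => if w ≠ "RECORD" then (st.1, st.2 ++ [line]) else (st.1 ++ [st.2], [line])

def g (dp : List (List String)) : List (List String) → List (List (List String))
  | [] => []
  | t :: ts => if isRec t then dp :: g [t] ts else g (dp ++ [t]) ts

def idxN : List (List String) → List Nat
  | [] => []
  | t :: ts => if isRec t then 0 :: (idxN ts).map (· + 1) else (idxN ts).map (· + 1)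

def segs (ts : List (List String)) (l : List Nat) : List (List (List String)) :=
  (l.zip l.tail).map (fun ab => (ts.drop ab.1).take (ab.2 - ab.1))

lemma pyGet1_none (t : List String) (h : ¬ 2 ≤ t.length) : PySem.List.pyGet? t 1 = none := by
  simp [PySem.List.pyGet?, PySem.List.pyIdx?]; omega

lemma pyGet1_some (t : List String) (h : 2 ≤ t.length) :
    PySem.List.pyGet? t 1 = some (t[1]'(by omega)) := by
  simp [PySem.List.pyGet?, PySem.List.pyIdx?, show 1 < t.length by omega]

lemma foldl_stepA_filter (l : List (List String)) (init) :
    l.foldl stepA init = (l.filter (fun t => decide (2 ≤ t.length))).foldl stepA init := by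
  induction l generalizing init with
  | nil => rfl
  | cons t ts ih =>
    by_cases h : 2 ≤ t.length
    · simp [h, List.foldl_cons, ih]
    · simp [h, List.foldl_cons, stepA, pyGet1_none t h, ih]

lemma foldl_stepA_fst (ts : List (List String)) (hts : ∀ t ∈ ts, 2 ≤ t.length) (ds dp) :
    (ts.foldl stepA (ds, dp)).1 = ds ++ g dp ts := by
  induction ts generalizing ds dp with
  | nil => simp [g]
  | cons t ts ih =>
    have h2 : 2 ≤ t.length := hts t (by simp)
    have hg := pyGet1_some t h2
    have hts' : ∀ u ∈ ts, 2 ≤ u.length := fun u hu => hts u (by simp [hu])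
    by_cases hr : t[1]'(by omega) = "RECORD"
    · have hi : isRec t = true := by simp [isRec, hg, hr]
      simp [List.foldl_cons, stepA, hg, hr, g, hi, ih hts']
    · have hi : isRec t = false := by simp [isRec, hg, hr]
      simp [List.foldl_cons, stepA, hg, hr, g, hi, ih hts']

lemma segs_shift (t : List String) (ts : List (List String)) (l : List Nat) :
    segs (t :: ts) (l.map (· + 1)) = segs ts l := by
  simp only [segs]
  rw [show (l.map (· + 1)).tail = l.tail.map (· + 1) by cases l <;> simp, List.zip_map]
  simp [Function.comp_def, Nat.succ_sub_succ]

-- main structural lemma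
lemma gM (ts : List (List String)) (dp : List (List String)) :
    g dp ts = match idxN ts with
      | [] => []
      | r0 :: _ => (dp ++ ts.take r0) :: segs ts (idxN ts) := by
  induction ts generalizing dp with
  | nil => simp [g, idxN]
  | cons t ts ih =>
    by_cases hi : isRec t = true
    · rw [g, if_pos hi, ih [t], idxN, if_pos hi]
      cases hl : idxN ts with
      | nil => simp [segs]
      | cons r0 rs =>
        simp only [List.map_cons]
        congr 1
        · simp
        · simp only [segs, List.tail_cons, List.zip_cons_cons, List.map_cons,
            List.drop_zero, List.take_succ_cons, Nat.sub_zero]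
          congr 1
          rw [show ((r0 + 1) :: rs.map (· + 1)).zip (rs.map (· + 1))
              = (((r0 :: rs).map (· + 1)).zip (((r0 :: rs).map (· + 1)).tail)) by simp]
          rw [show (((r0 :: rs).map (· + 1)).zip (((r0 :: rs).map (· + 1)).tail)).map
                (fun ab => ((t :: ts).drop ab.1).take (ab.2 - ab.1))
              = segs (t :: ts) ((r0 :: rs).map (· + 1)) by simp [segs]]
          rw [segs_shift]
          simp [segs]
    · rw [g, if_neg hi, ih (dp ++ [t]), idxN, if_neg hi]
      cases hl : idxN ts with
      | nil => simp
      | cons r0 rs =>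
        simp only [List.map_cons]
        congr 1
        · simp
        · rw [show ((r0 + 1) :: rs.map (· + 1)) = ((r0 :: rs).map (· + 1)) by simp, segs_shift]

lemma Bidx (ts : List (List String)) (s : Int) :
    (PySem.List.enumerate ts s).filterMap
        (fun p => if PySem.List.pyGet? p.2 1 = some "RECORD" then some p.1 else none)
      = (idxN ts).map (fun n : Nat => s + (n : Int)) := by
  induction ts generalizing s with
  | nil => simp [PySem.List.enumerate_nil, idxN]
  | cons t ts ih =>
    rw [PySem.List.enumerate_cons, List.filterMap_cons, idxN]
    by_cases hi : isRec t = true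
    · have hp : PySem.List.pyGet? t 1 = some "RECORD" := by simpa [isRec] using hi
      simp only [hp, if_pos hi, ih, List.map_cons, List.map_map, if_true]
      congr 1
      · simp
      · apply List.map_congr_left
        intro n _
        simp
        ring
    · have hp : ¬ PySem.List.pyGet? t 1 = some "RECORD" := by simpa [isRec] using hi
      simp only [hp, if_neg hi, ih, List.map_map, if_false]
      apply List.map_congr_left
      intro n _
      simp
      ring


theorem slice_data_spec : Claim_equal_slice_data := by
  intro data _
  show slice_data data = slice_data_alt data
  -- A's side: range-indexed fold = fold over the split lines, then over the kept tokens
  have hA : slice_data data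
      = ((((data.map PySem.Str.split₀).filter (fun t => decide (2 ≤ t.length))).foldl
            stepA ([], [])).1).tail := by
    rw [slice_data]
    rw [show (List.foldl
          (fun (st : List (List (List String)) × List (List String)) i =>
            let line := PySem.Str.split₀ (PySem.List.pyGetD data i "")
            match PySem.List.pyGet? line 1 with
            | none => st
            | some w => if w ≠ "RECORD" then (st.1, st.2 ++ [line]) else (st.1 ++ [st.2], [line]))
          ([], []) (PySem.List.pyRange 0 (PySem.List.len data) 1))
        = List.foldl (fun st i => stepA st (PySem.Str.split₀ (PySem.List.pyGetD data i "")))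
            ([], []) (PySem.List.pyRange 0 (PySem.List.len data) 1) from rfl]
    rw [PySem.List.foldl_pyRange_zero_pyGetD data ""
      (fun st s => stepA st (PySem.Str.split₀ s)) ([], [])]
    rw [← List.foldl_map, foldl_stepA_filter, PySem.List.slice_from_one]
  set tokens := (data.map PySem.Str.split₀).filter (fun t => decide (2 ≤ t.length)) with htok
  have htl : ∀ t ∈ tokens, 2 ≤ t.length := by
    intro t ht
    have := List.of_mem_filter ht
    simpa using this
  rw [hA, foldl_stepA_fst tokens htl [] []]
  -- B's side
  rw [slice_data_alt]
  rw [show ((data.map PySem.Str.split₀).filter (fun t => decide (2 ≤ t.length))) = tokens from rfl]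
  rw [Bidx tokens 0]
  have hmap : (idxN tokens).map (fun n : Nat => (0 : Int) + (n : Int))
      = (idxN tokens).map (fun n : Nat => (n : Int)) := by
    apply List.map_congr_left; intro n _; ring
  rw [hmap]
  rw [show ((idxN tokens).map (fun n : Nat => (n : Int))).tail
      = (idxN tokens).tail.map (fun n : Nat => (n : Int)) by cases idxN tokens <;> simp]
  rw [List.zip_map]
  rw [List.map_map]
  have hseg : ((idxN tokens).zip (idxN tokens).tail).map
      ((fun ab => PySem.List.slice tokens (some ab.1) (some ab.2)) ∘
        Prod.map (fun n : Nat => (n : Int)) (fun n : Nat => (n : Int)))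
      = segs tokens (idxN tokens) := by
    apply List.map_congr_left
    intro ab _
    simp [PySem.List.slice_natCast]
  rw [hseg]
  -- connect via the structural characterisation of A's groups
  rw [List.nil_append, gM]
  cases hl : idxN tokens with
  | nil => simp [segs]
  | cons r0 rs => simp
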